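-- pv_equiv track=rewrite | github.com/GordonBreazz/CODEWARS | Python/6kyu--Alphabet-war-airstrike-letters-massacre.py | alphabet_war
-- ===== SOURCE A (Python) =====
-- def alphabet_war(fight):
--     #your code here
--     letters = {'w': 4, 'p': 3, 'b': 2, 's': 1, 'm': -4, 'q': -3, 'd': -2, 'z': -1}
--     sum, pred, fl = 0, 0, False
--     for ch in fight:
--         if fl:
--             if ch != '*': fl = False
--             continue
--         if ch == '*':
--             sum -= pred
--             fl = True
--         try:
--             tmp = letters[ch]
--         except:
--             tmp = 0
--         sum += tmp
--         pred = tmp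
--     result = "Let's fight again!"
--     if sum > 0: result = 'Left side wins!'
--     if sum < 0: result = 'Right side wins!'
--     return result
-- ===== SOURCE B (Python) =====
-- def alphabet_war(fight):
--     scores = {'w': 4, 'p': 3, 'b': 2, 's': 1, 'm': -4, 'q': -3, 'd': -2, 'z': -1}
--     # Each '*' delimiter destroys the letter right before it and right after it;
--     # splitting on '*' and trimming the edges of each piece removes exactly those letters.
--     parts = fight.split('*')
--     last = len(parts) - 1
--     total = 0
--     for idx, part in enumerate(parts):
--         core = part
--         if idx > 0:
--             core = core[1:]
--         if idx < last:
--             core = core[:-1]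
--         for c in core:
--             total += scores.get(c, 0)
--     if total > 0:
--         return 'Left side wins!'
--     if total < 0:
--         return 'Right side wins!'
--     return "Let's fight again!"
-- ===== Notes on version B (the rewrite author's own statement) =====
-- stated objective: alternative
-- what changed: Replaces A's single-pass flag/pred state machine with a split-on-asterisk decomposition: B splits the string at the bombs, trims the last character of every part that precedes a delimiter and the first character of every part that follows one, and sums the surviving letters' scores.
import Mathlib
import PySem

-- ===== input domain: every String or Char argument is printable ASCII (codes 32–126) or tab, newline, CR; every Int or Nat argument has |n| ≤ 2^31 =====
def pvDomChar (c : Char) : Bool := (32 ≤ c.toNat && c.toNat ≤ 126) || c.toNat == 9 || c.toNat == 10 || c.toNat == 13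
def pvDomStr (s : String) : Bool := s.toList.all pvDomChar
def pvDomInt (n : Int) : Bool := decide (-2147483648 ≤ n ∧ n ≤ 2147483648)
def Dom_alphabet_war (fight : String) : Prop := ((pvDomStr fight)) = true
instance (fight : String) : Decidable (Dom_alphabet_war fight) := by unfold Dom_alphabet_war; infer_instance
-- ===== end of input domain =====

-- B replaces A's one-pass flag/pred state machine by split-on-'*' plus edge-trimming of the parts (alternative decomposition, same cost).

-- ===== PORT A =====
def awLetters : PySem.Dict Char Int :=
  PySem.Dict.ofList [('w', 4), ('p', 3), ('b', 2), ('s', 1), ('m', -4), ('q', -3), ('d', -2), ('z', -1)]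

-- one loop iteration of A: state = (sum, pred, fl)
def awStep (st : Int × Int × Bool) (ch : Char) : Int × Int × Bool :=
  if st.2.2 then
    -- if ch != '*': fl = False; continue  (state otherwise kept)
    (st.1, st.2.1, ch == '*')
  else
    let sum := if ch == '*' then st.1 - st.2.1 else st.1
    let fl := ch == '*'
    let tmp := awLetters.getD ch 0   -- try/except KeyError → 0
    (sum + tmp, tmp, fl)

def alphabet_war (fight : String) : String :=
  let st := fight.toList.foldl awStep (0, 0, false)
  let sum := st.1
  let result := "Let's fight again!"
  let result := if sum > 0 then "Left side wins!" else result
  let result := if sum < 0 then "Right side wins!" else result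
  result

-- ===== PORT B =====
def awScores : PySem.Dict Char Int :=
  PySem.Dict.ofList [('w', 4), ('p', 3), ('b', 2), ('s', 1), ('m', -4), ('q', -3), ('d', -2), ('z', -1)]

-- loop body of B: one (idx, part) pair of enumerate(parts)
def awPartScore (last : Int) (total : Int) (ip : Int × List Char) : Int :=
  let core := ip.2
  let core := if ip.1 > 0 then PySem.List.slice core (some 1) none else core      -- core[1:]
  let core := if ip.1 < last then PySem.List.slice core none (some (-1)) else core -- core[:-1]
  core.foldl (fun t c => t + awScores.getD c 0) total

def alphabet_war_alt (fight : String) : String :=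
  let parts := PySem.Chars.splitOn fight.toList ['*']   -- fight.split('*')
  let last : Int := (parts.length : Int) - 1
  let total := (PySem.List.enumerate parts 0).foldl (awPartScore last) 0
  if total > 0 then "Left side wins!"
  else if total < 0 then "Right side wins!"
  else "Let's fight again!"

-- ===== PRECONDITION & SPEC =====
def Spec_alphabet_war (fight : String) (out : String) : Prop := out = alphabet_war_alt fight
instance (fight : String) (out : String) : Decidable (Spec_alphabet_war fight out) := by unfold Spec_alphabet_war; infer_instance

-- ===== CLAIM (what is proved, stated in full; the proofs are below) =====
def Claim_equal_alphabet_war : Prop := ∀ (fight : String), Dom_alphabet_war fight → Spec_alphabet_war fight (alphabet_war fight)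

-- ===== LEMMAS AND PROOFS =====

-- score of one character (the shared dict, default 0)
def awV (c : Char) : Int := awScores.getD c 0

def awSumv (l : List Char) : Int := (l.map awV).sum

-- A's loop as structural recursion: fA = sum contributed from fl=false with pred p; gA from fl=true (pred is 0 there)
mutual
def fA (p : Int) : List Char → Int
  | [] => 0
  | c :: r => if c = '*' then -p + gA r else awV c + fA (awV c) r
  termination_by l => l.length
def gA : List Char → Int
  | [] => 0
  | c :: r => if c = '*' then gA r else fA 0 r
  termination_by l => l.length
end

-- structural model of fight.split('*') with an accumulator for the current piece
def awSplit (pre : List Char) : List Char → List (List Char)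
  | [] => [pre]
  | c :: r => if c = '*' then pre :: awSplit [] r else awSplit (pre ++ [c]) r

-- B's trimmed sums: brest over the non-first parts, bsum over the whole part list
def awBrest : List (List Char) → Int
  | [] => 0
  | p :: rest => (if rest.isEmpty then awSumv p.tail else awSumv p.tail.dropLast) + awBrest rest

def awBsum : List (List Char) → Int
  | [] => 0
  | p :: rest => (if rest.isEmpty then awSumv p else awSumv p.dropLast) + awBrest rest

lemma awFoldA (l : List Char) :
    (∀ s p, (l.foldl awStep (s, p, false)).1 = s + fA p l) ∧
    (∀ s, (l.foldl awStep (s, 0, true)).1 = s + gA l) := by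
  induction l with
  | nil => simp [fA, gA]
  | cons c r ih =>
    constructor
    · intro s p
      by_cases hc : c = '*'
      · subst hc
        have h1 : awStep (s, p, false) '*' = (s - p + 0, 0, true) := by
          simp [awStep]
          decide
        simp only [List.foldl_cons, h1, ih.2, fA, if_pos]
        ring
      · have h1 : awStep (s, p, false) c = (s + awV c, awV c, false) := by
          simp [awStep, hc, awV, awScores, awLetters]
        simp only [List.foldl_cons, h1, ih.1, fA, hc, if_neg, not_false_iff]
        ring
    · intro s
      by_cases hc : c = '*'
      · subst hc
        have h1 : awStep (s, 0, true) '*' = (s, 0, true) := by simp [awStep]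
        simp only [List.foldl_cons, h1, ih.2, gA, if_pos]
      · have h1 : awStep (s, 0, true) c = (s, 0, false) := by simp [awStep, hc]
        simp only [List.foldl_cons, h1, ih.1, gA, hc, if_neg, not_false_iff]

-- the pred argument of fA only matters when the list starts with '*'
lemma fA_zero (l : List Char) (p : Int) :
    fA p l = (if l.head? = some '*' then -p else 0) + fA 0 l := by
  cases l with
  | nil => simp [fA]
  | cons c r =>
    by_cases hc : c = '*'
    · simp [fA, hc]
    · simp [fA, hc]

-- pushing a char onto the accumulator only extends the first produced part
lemma awSplit_acc (l : List Char) : ∀ pre : List Char,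
    awSplit pre l = (pre ++ (awSplit [] l).headI) :: (awSplit [] l).tail := by
  induction l with
  | nil => intro pre; simp [awSplit]
  | cons c r ih =>
    intro pre
    by_cases hc : c = '*'
    · subst hc; simp [awSplit]
    · rw [show awSplit pre (c :: r) = awSplit (pre ++ [c]) r from by simp [awSplit, hc],
        show awSplit [] (c :: r) = awSplit [c] r from by simp [awSplit, hc],
        ih (pre ++ [c]), ih [c]]
      simp

lemma awSplit_ne_nil (l : List Char) (pre : List Char) : awSplit pre l ≠ [] := by
  rw [awSplit_acc]
  simp

-- trimming the head of the first part turns brest into bsum of the shorter accumulator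
lemma awBrest_cons_acc (l : List Char) (d : Char) (pre : List Char) :
    awBrest (awSplit (d :: pre) l) = awBsum (awSplit pre l) := by
  rw [awSplit_acc l (d :: pre), awSplit_acc l pre]
  simp [awBrest, awBsum]

lemma awB12 : ∀ n (l : List Char), l.length ≤ n →
    (∀ pre, awBsum (awSplit pre l) =
      (if l.head? = some '*' then awSumv pre.dropLast else awSumv pre) + fA 0 l) ∧
    (awBrest (awSplit [] l) = gA l) := by
  intro n
  induction n with
  | zero =>
    intro l hl
    have : l = [] := List.length_eq_zero_iff.mp (Nat.le_zero.mp hl)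
    subst this
    constructor
    · intro pre; simp [awSplit, awBsum, awBrest, fA]
    · simp [awSplit, awBrest, gA, awSumv]
  | succ n ih =>
    intro l hl
    cases l with
    | nil =>
      constructor
      · intro pre; simp [awSplit, awBsum, awBrest, fA]
      · simp [awSplit, awBrest, gA, awSumv]
    | cons c r =>
      have hr : r.length ≤ n := by simpa using Nat.succ_le_succ_iff.mp hl
      constructor
      · intro pre
        by_cases hc : c = '*'
        · have hne : awSplit [] r ≠ [] := awSplit_ne_nil r []
          simp only [awSplit, hc, if_pos, awBsum, List.isEmpty_eq_false_iff.mpr hne,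
            Bool.false_eq_true, if_neg, not_false_iff, (ih r hr).2]
          simp [fA]
        · have h1 := (ih r hr).1 (pre ++ [c])
          simp only [awSplit, hc, if_neg, not_false_iff]
          rw [h1]
          have h2 : fA 0 (c :: r) = awV c + fA (awV c) r := by simp [fA, hc]
          rw [h2, fA_zero r (awV c)]
          have h3 : awSumv (pre ++ [c]) = awSumv pre + awV c := by simp [awSumv]
          have h4 : (pre ++ [c]).dropLast = pre := by simp
          by_cases hh : r.head? = some '*' <;> · simp [hh, h3, h4, hc]; try ring
      · by_cases hc : c = '*'
        · have hne : awSplit [] r ≠ [] := awSplit_ne_nil r []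
          simp only [awSplit, hc, if_pos, awBrest, List.isEmpty_eq_false_iff.mpr hne,
            Bool.false_eq_true, if_neg, not_false_iff, (ih r hr).2]
          simp [gA, awSumv]
        · simp only [awSplit, hc, if_neg, not_false_iff, List.nil_append]
          rw [awBrest_cons_acc r c [], (ih r hr).1 []]
          have : gA (c :: r) = fA 0 r := by simp [gA, hc]
          rw [this]
          by_cases hh : r.head? = some '*' <;> simp [hh, awSumv]

-- PySem's fuel-based split agrees with the structural model
lemma awGo : ∀ (fuel : Nat) (l cur : List Char) (acc : List (List Char)), l.length < fuel →
    PySem.Chars.splitOn.go ['*'] fuel l cur acc = acc.reverse ++ awSplit cur.reverse l := by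
  intro fuel
  induction fuel with
  | zero => intro l cur acc h; omega
  | succ n ih =>
    intro l cur acc h
    cases l with
    | nil =>
      rw [PySem.Chars.splitOn.go.eq_def]
      simp [awSplit]
    | cons c r =>
      rw [PySem.Chars.splitOn.go.eq_def]
      by_cases hc : c = '*'
      · subst hc
        have hp : (['*'] : List Char).isPrefixOf ('*' :: r) = true := by simp [List.isPrefixOf]
        simp only [hp, if_pos]
        rw [show List.drop (['*'] : List Char).length ('*' :: r) = r from rfl,
          ih r [] ((cur.reverse) :: acc) (by simpa using Nat.lt_of_succ_lt_succ (by simpa using h))]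
        simp [awSplit]
      · have hp : (['*'] : List Char).isPrefixOf (c :: r) = false := by
          simp [List.isPrefixOf]
          exact fun h' => (hc h'.symm).elim
        simp only [hp, Bool.false_eq_true, if_neg, not_false_iff]
        rw [ih r (c :: cur) acc (by simpa using Nat.lt_of_succ_lt_succ (by simpa using h))]
        simp [awSplit, hc]

lemma awSplitOn_eq (l : List Char) : PySem.Chars.splitOn l ['*'] = awSplit [] l := by
  show PySem.Chars.splitOn.go ['*'] (l.length + 1) l [] [] = _
  rw [awGo (l.length + 1) l [] [] (by omega)]
  simp

lemma awInner (xs : List Char) (acc : Int) :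
    xs.foldl (fun t c => t + awScores.getD c 0) acc = acc + awSumv xs := by
  rw [PySem.List.foldl_add xs (fun c => awScores.getD c 0) acc]
  rfl

-- the enumerate-fold over the non-first parts computes brest
lemma awFoldR : ∀ (rest : List (List Char)) (i acc : Int), 1 ≤ i → rest ≠ [] →
    (PySem.List.enumerate rest i).foldl (awPartScore (i + rest.length - 1)) acc = acc + awBrest rest := by
  intro rest
  induction rest with
  | nil => intro i acc _ h; exact absurd rfl h
  | cons p rest ih =>
    intro i acc hi _
    rw [PySem.List.enumerate_cons]
    cases rest with
    | nil =>
      have hbody : awPartScore (i + ([p] : List (List Char)).length - 1) acc (i, p) = acc + awSumv p.tail := by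
        simp only [awPartScore, List.length_cons, List.length_nil]
        have h1 : (i : Int) > 0 := by omega
        have h2 : ¬ ((i : Int) < i + (0 + 1 : Nat) - 1) := by omega
        simp only [h1, if_pos, h2, if_neg, not_false_iff, PySem.List.slice_from_one]
        exact awInner p.tail acc
      simp only [List.foldl_cons, hbody, PySem.List.enumerate, List.foldl_nil]
      simp [awBrest]
    | cons q rs =>
      have hL : i + ((p :: q :: rs : List (List Char)).length : Int) - 1
          = (i + 1) + ((q :: rs : List (List Char)).length : Int) - 1 := by
        simp only [List.length_cons]; push_cast; ring
      have hbody : awPartScore (i + ((p :: q :: rs : List (List Char)).length : Int) - 1) acc (i, p)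
          = acc + awSumv p.tail.dropLast := by
        simp only [awPartScore]
        have h1 : (i : Int) > 0 := by omega
        have h2 : (i : Int) < i + ((p :: q :: rs : List (List Char)).length : Int) - 1 := by
          simp only [List.length_cons]; push_cast; omega
        simp only [h1, if_pos, h2, PySem.List.slice_from_one, PySem.List.slice_to_neg_one]
        exact awInner p.tail.dropLast acc
      simp only [List.foldl_cons, hbody]
      rw [hL, ih (i + 1) (acc + awSumv p.tail.dropLast) (by omega) (by simp)]
      have : awBrest (p :: q :: rs) = awSumv p.tail.dropLast + awBrest (q :: rs) := by
        simp [awBrest]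
      rw [this]; ring

-- B's whole fold computes bsum of the split
lemma awAltTotal (l : List Char) :
    (PySem.List.enumerate (awSplit [] l) 0).foldl
        (awPartScore ((awSplit [] l).length - 1)) 0 = awBsum (awSplit [] l) := by
  rcases hsp : awSplit [] l with _ | ⟨p, rest⟩
  · exact absurd hsp (awSplit_ne_nil l [])
  rw [PySem.List.enumerate_cons]
  cases rest with
  | nil =>
    have hbody : awPartScore (((([p] : List (List Char)).length : Int)) - 1) 0 (0, p) = awSumv p := by
      simp only [awPartScore, List.length_cons, List.length_nil]
      have h1 : ¬ ((0 : Int) > 0) := by omega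
      have h2 : ¬ ((0 : Int) < ((0 + 1 : Nat) : Int) - 1) := by norm_num
      simp only [h1, if_neg, not_false_iff, h2]
      simpa using awInner p 0
    simp only [List.foldl_cons, hbody, PySem.List.enumerate, List.foldl_nil]
    simp [awBsum, awBrest]
  | cons q rs =>
    have hbody : awPartScore ((((p :: q :: rs : List (List Char)).length : Int)) - 1) 0 (0, p)
        = awSumv p.dropLast := by
      simp only [awPartScore]
      have h1 : ¬ ((0 : Int) > 0) := by omega
      have h2 : (0 : Int) < ((p :: q :: rs : List (List Char)).length : Int) - 1 := by
        simp only [List.length_cons]; push_cast; omega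
      simp only [h1, if_neg, not_false_iff, h2, if_pos, PySem.List.slice_to_neg_one]
      simpa using awInner p.dropLast 0
    simp only [List.foldl_cons, hbody]
    have hL : (((p :: q :: rs : List (List Char)).length : Int)) - 1
        = 1 + ((q :: rs : List (List Char)).length : Int) - 1 := by
      simp only [List.length_cons]; push_cast; ring
    rw [hL, show (0 : Int) + 1 = 1 from rfl,
      awFoldR (q :: rs) 1 (awSumv p.dropLast) (by omega) (by simp)]
    simp [awBsum]

lemma awTotals (l : List Char) :
    (l.foldl awStep ((0 : Int), (0 : Int), false)).1
      = (PySem.List.enumerate (PySem.Chars.splitOn l ['*']) 0).foldl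
          (awPartScore (((PySem.Chars.splitOn l ['*']).length : Int) - 1)) 0 := by
  rw [awSplitOn_eq, (awFoldA l).1 0 0, awAltTotal l]
  have := (awB12 l.length l (le_refl _)).1 []
  simp only [List.dropLast_nil, awSumv, List.map_nil, List.sum_nil] at this
  rw [this]
  by_cases hh : l.head? = some '*' <;> simp [hh]

-- ===== VERDICT (by name: the statement is the Claim_ definition above) =====
theorem alphabet_war_spec : Claim_equal_alphabet_war := by
  intro fight _
  unfold Spec_alphabet_war alphabet_war alphabet_war_alt
  dsimp only
  rw [awTotals fight.toList]
  set t := (PySem.List.enumerate (PySem.Chars.splitOn fight.toList ['*']) 0).foldl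
      (awPartScore (((PySem.Chars.splitOn fight.toList ['*']).length : Int) - 1)) 0 with ht
  rcases lt_trichotomy t 0 with h | h | h
  · simp [h, not_lt.mpr (le_of_lt h)]
  · simp [h]
  · simp [h, not_lt.mpr (le_of_lt h)]
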